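-- pv_equiv track=rewrite | github.com/garvitxjoshi/Password_Manager | Python Password Manager/Main/password_strength.py | _has_repeated_chars
-- ===== SOURCE A (Python) =====
-- def _has_repeated_chars(s, repeat_threshold=4):
--     """
--     Detect long runs of the same character (e.g., 'aaaaa').
--     Returns True if any character repeats consecutively >= repeat_threshold times.
--     """
--     cnt = 1
--     prev = ""
--     for ch in s:
--         if ch == prev:
--             cnt += 1
--             if cnt >= repeat_threshold:
--                 return True
--         else:
--             cnt = 1
--         prev = ch
--     return False
-- ===== SOURCE B (Python) =====
-- def _has_repeated_chars(s, repeat_threshold=4):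
--     """
--     Detect long runs of the same character (e.g., 'aaaaa').
--     Returns True if any character repeats consecutively >= repeat_threshold times.
--     """
--     # A run counts only once its counter has reached 2, so the effective
--     # threshold is max(repeat_threshold, 2).  Window test: some position
--     # starts `need` copies of the same character; a window wider than the
--     # string can never fit.
--     need = max(repeat_threshold, 2)
--     if need > len(s):
--         return False
--     return any(s[i:i + need] == s[i] * need for i in range(len(s) - need + 1))
-- ===== Notes on version B (the rewrite author's own statement) =====
-- stated objective: alternative
-- what changed: Replaces the stateful per-character run-counter loop (cnt/prev with early return) by a sliding-window existence test: some index starts need = max(threshold,2) copies of the same character, expressed as slice comparisons over range(len(s)-need+1) after an early False when the window cannot fit.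
import Mathlib
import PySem

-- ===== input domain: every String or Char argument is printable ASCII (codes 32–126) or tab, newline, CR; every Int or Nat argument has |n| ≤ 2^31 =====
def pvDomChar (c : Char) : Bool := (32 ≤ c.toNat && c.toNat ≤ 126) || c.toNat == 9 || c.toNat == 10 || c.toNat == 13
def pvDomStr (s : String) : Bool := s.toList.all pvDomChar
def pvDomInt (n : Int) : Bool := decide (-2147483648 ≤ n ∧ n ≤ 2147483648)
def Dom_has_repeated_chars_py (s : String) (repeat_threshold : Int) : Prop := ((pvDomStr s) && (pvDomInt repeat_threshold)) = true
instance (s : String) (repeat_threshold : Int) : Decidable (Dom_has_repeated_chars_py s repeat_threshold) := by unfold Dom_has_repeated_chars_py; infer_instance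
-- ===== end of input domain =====

-- B replaces A's stateful run-counter loop by a sliding-window existence test (alternative decomposition, same cost class).

-- ===== PORT A =====
-- loop state: cnt, prev; prev is Option Char (Python's initial prev = "" never equals a character, modelled by none — exact)
def pvALoop (thr : Int) : List Char → Int → Option Char → Bool
  | [], _, _ => false
  | ch :: rest, cnt, prev =>
    if prev == some ch then
      if thr ≤ cnt + 1 then true
      else pvALoop thr rest (cnt + 1) (some ch)
    else pvALoop thr rest 1 (some ch)

def has_repeated_chars_py (s : String) (repeat_threshold : Int) : Bool :=
  pvALoop repeat_threshold s.toList 1 none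

-- ===== PORT B =====
-- Source B's `need = max(repeat_threshold, 2)` is inlined as `max repeat_threshold 2`
def has_repeated_chars_py_alt (s : String) (repeat_threshold : Int) : Bool :=
  if (s.toList.length : Int) < max repeat_threshold 2 then false
  else (PySem.List.pyRange 0 ((s.toList.length : Int) - max repeat_threshold 2 + 1) 1).any fun i =>
    PySem.List.slice s.toList (some i) (some (i + max repeat_threshold 2))
      == List.replicate (max repeat_threshold 2).toNat ((PySem.List.pyGet? s.toList i).getD ' ')

-- ===== PRECONDITION & SPEC =====
def Spec_has_repeated_chars_py (s : String) (repeat_threshold : Int) (out : Bool) : Prop := out = has_repeated_chars_py_alt s repeat_threshold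
instance (s : String) (repeat_threshold : Int) (out : Bool) : Decidable (Spec_has_repeated_chars_py s repeat_threshold out) := by unfold Spec_has_repeated_chars_py; infer_instance

-- ===== CLAIM (what is proved, stated in full; the proofs are below) =====
def Claim_equal_has_repeated_chars_py : Prop := ∀ (s : String) (repeat_threshold : Int), Dom_has_repeated_chars_py s repeat_threshold → Spec_has_repeated_chars_py s repeat_threshold (has_repeated_chars_py s repeat_threshold)

-- ===== LEMMAS AND PROOFS =====

-- common characterisation: some position starts n consecutive equal characters
def pvGood (n : ℕ) : List Char → Bool
  | [] => false
  | c :: rest => (decide (rest.take (n-1) = List.replicate (n-1) c)) || pvGood n rest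

theorem pv_take_shrink {l : List Char} {c : Char} {j m : ℕ} (hmj : m ≤ j)
    (h : l.take j = List.replicate j c) : l.take m = List.replicate m c := by
  have : l.take m = (l.take j).take m := by rw [List.take_take, Nat.min_eq_left hmj]
  rw [this, h, List.take_replicate, Nat.min_eq_left hmj]

theorem pvALoop_eq (thr : Int) (rest : List Char) : ∀ (p : Char) (cnt : Int), 1 ≤ cnt →
    (pvALoop thr rest cnt (some p) = true ↔
      (∃ j : ℕ, 1 ≤ j ∧ rest.take j = List.replicate j p ∧ thr ≤ cnt + j)
        ∨ pvGood (max thr 2).toNat rest = true) := by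
  induction rest with
  | nil =>
    intro p cnt _
    simp only [pvALoop, pvGood]
    constructor
    · intro h; cases h
    · rintro (⟨j, hj1, hjt, _⟩ | h)
      · have : (List.replicate j p).length = 0 := by rw [← hjt]; simp
        simp at this; omega
      · cases h
  | cons c rest ih =>
    intro p cnt hcnt
    by_cases hcp : p = c
    · subst hcp
      simp only [pvALoop, beq_self_eq_true, if_true]
      by_cases hthr : thr ≤ cnt + 1
      · simp only [hthr, if_true]
        constructor
        · intro _
          exact Or.inl ⟨1, le_refl 1, by simp, by omega⟩
        · intro _; trivial
      · simp only [hthr, if_false]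
        rw [ih p (cnt + 1) (by omega)]
        constructor
        · rintro (⟨j, hj1, hjt, hjthr⟩ | h)
          · exact Or.inl ⟨j + 1, by omega, by simpa [List.replicate_succ] using hjt, by omega⟩
          · refine Or.inr ?_
            simp [pvGood, h]
        · rintro (⟨j, hj1, hjt, hjthr⟩ | h)
          · match j, hj1 with
            | 1, _ => exfalso; omega
            | (j' + 2), _ =>
              refine Or.inl ⟨j' + 1, by omega, ?_, by omega⟩
              simpa [List.replicate_succ] using hjt
          · simp only [pvGood, Bool.or_eq_true, decide_eq_true_eq] at h
            rcases h with h | h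
            · -- head window of c::rest: rest starts with n-1 copies of c
              refine Or.inl ⟨(max thr 2).toNat - 1, by omega, h, by omega⟩
            · exact Or.inr h
    · have hbeq : (some p == some c) = false := by
        simp only [beq_eq_false_iff_ne, ne_eq, Option.some.injEq]
        exact hcp
      simp only [pvALoop, hbeq, Bool.false_eq_true, if_false]
      rw [ih c 1 (le_refl 1)]
      have hL : ¬ (∃ j : ℕ, 1 ≤ j ∧ (c :: rest).take j = List.replicate j p ∧ thr ≤ cnt + j) := by
        rintro ⟨j, hj1, hjt, _⟩
        match j, hj1 with
        | (j' + 1), _ =>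
          simp [List.replicate_succ] at hjt
          exact hcp hjt.1.symm
      have hiff : (∃ j : ℕ, 1 ≤ j ∧ rest.take j = List.replicate j c ∧ thr ≤ 1 + j)
            ↔ rest.take ((max thr 2).toNat - 1) = List.replicate ((max thr 2).toNat - 1) c := by
        constructor
        · rintro ⟨j, hj1, hjt, hjthr⟩
          exact pv_take_shrink (by omega) hjt
        · intro h
          exact ⟨(max thr 2).toNat - 1, by omega, h, by omega⟩
      constructor
      · rintro (h | h)
        · exact Or.inr (by simp [pvGood, hiff.mp h])
        · exact Or.inr (by simp [pvGood, h])
      · rintro (h | h)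
        · exact absurd h hL
        · simp only [pvGood, Bool.or_eq_true, decide_eq_true_eq] at h
          rcases h with h | h
          · exact Or.inl (hiff.mpr h)
          · exact Or.inr h

theorem pvA_eq_good (thr : Int) (cs : List Char) :
    pvALoop thr cs 1 none = pvGood (max thr 2).toNat cs := by
  cases cs with
  | nil => simp [pvALoop, pvGood]
  | cons c rest =>
    have hnone : ((none : Option Char) == some c) = false := rfl
    simp only [pvALoop, hnone, Bool.false_eq_true, if_false]
    rw [Bool.eq_iff_iff]
    rw [pvALoop_eq thr rest c 1 (le_refl 1)]
    have hiff : (∃ j : ℕ, 1 ≤ j ∧ rest.take j = List.replicate j c ∧ thr ≤ 1 + j)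
          ↔ rest.take ((max thr 2).toNat - 1) = List.replicate ((max thr 2).toNat - 1) c := by
      constructor
      · rintro ⟨j, hj1, hjt, hjthr⟩
        exact pv_take_shrink (by omega) hjt
      · intro hh
        exact ⟨(max thr 2).toNat - 1, by omega, hh, by omega⟩
    rw [hiff]
    simp [pvGood]

theorem pvB_window (cs : List Char) (m : ℕ) (hm : 1 ≤ m) :
    ((List.range cs.length).any fun k =>
        ((cs.drop k).take m == List.replicate m (cs[k]?.getD ' '))) = pvGood m cs := by
  induction cs with
  | nil => simp [pvGood]
  | cons c rest ih =>
    rw [List.length_cons, List.range_succ_eq_map]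
    simp only [List.any_cons, List.any_map]
    have h0 : (((c :: rest).drop 0).take m == List.replicate m ((c :: rest)[0]?.getD ' '))
        = decide (rest.take (m-1) = List.replicate (m-1) c) := by
      simp only [List.drop_zero, List.getElem?_cons_zero, Option.getD_some]
      rw [Bool.eq_iff_iff]
      match m, hm with
      | (m' + 1), _ =>
        simp [List.take_succ_cons, List.replicate_succ]
    have hrest : (Function.comp (fun k =>
          ((c :: rest).drop k).take m == List.replicate m ((c :: rest)[k]?.getD ' ')) (fun n => n + 1))
        = fun k => ((rest.drop k).take m == List.replicate m (rest[k]?.getD ' ')) := by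
      funext k
      simp [Function.comp]
    rw [h0, hrest, ih]
    simp [pvGood]

theorem pvGood_false_of_short : ∀ (cs : List Char) (m : ℕ), cs.length < m → pvGood m cs = false := by
  intro cs
  induction cs with
  | nil => intro m _; rfl
  | cons c rest ih =>
    intro m h
    simp only [List.length_cons] at h
    simp only [pvGood, Bool.or_eq_false_iff, decide_eq_false_iff_not]
    refine ⟨?_, ih m (by omega)⟩
    intro heq
    have := congrArg List.length heq
    simp at this
    omega

theorem pv_window_late (cs : List Char) (m k : ℕ) (hm : 1 ≤ m) (h : cs.length < k + m) :
    ((cs.drop k).take m == List.replicate m (cs[k]?.getD ' ')) = false := by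
  simp only [beq_eq_false_iff_ne, ne_eq]
  intro heq
  have := congrArg List.length heq
  simp at this
  omega

theorem pvB_window_trunc (cs : List Char) (m : ℕ) (hm : 1 ≤ m) (hlen : m ≤ cs.length) :
    ((List.range (cs.length - m + 1)).any fun k =>
        ((cs.drop k).take m == List.replicate m (cs[k]?.getD ' ')))
      = ((List.range cs.length).any fun k =>
        ((cs.drop k).take m == List.replicate m (cs[k]?.getD ' '))) := by
  have hsplit : cs.length = (cs.length - m + 1) + (m - 1) := by omega
  conv_rhs => rw [hsplit, List.range_add]
  rw [List.any_append, List.any_map]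
  have h2 : ((List.range (m-1)).any ((fun k =>
      ((cs.drop k).take m == List.replicate m (cs[k]?.getD ' '))) ∘ fun x => (cs.length - m + 1) + x)) = false := by
    rw [List.any_eq_false]
    intro j hj
    simp only [Function.comp]
    rw [pv_window_late cs m ((cs.length - m + 1) + j) hm (by rw [List.mem_range] at hj; omega)]
    simp
  rw [h2, Bool.or_false]

theorem pvB_eq_good (s : String) (thr : Int) :
    has_repeated_chars_py_alt s thr = pvGood (max thr 2).toNat s.toList := by
  unfold has_repeated_chars_py_alt
  have hneed : max thr 2 = (((max thr 2).toNat : ℕ) : Int) := by omega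
  set m := (max thr 2).toNat with hmdef
  by_cases hlt : (s.toList.length : Int) < max thr 2
  · rw [if_pos hlt, pvGood_false_of_short s.toList m (by omega)]
  · rw [if_neg hlt]
    have hle : m ≤ s.toList.length := by omega
    have harg : (s.toList.length : Int) - max thr 2 + 1 = ((s.toList.length - m + 1 : ℕ) : Int) := by
      push_cast; omega
    rw [harg, PySem.List.pyRange_zero_natCast, List.any_map,
        ← pvB_window s.toList m (by omega), ← pvB_window_trunc s.toList m (by omega) hle]
    congr 1
    funext k
    simp only [Function.comp]
    rw [hneed, PySem.List.slice_natCast_add, PySem.List.pyGet?_natCast]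

-- ===== VERDICT (by name: the statement is the Claim_ definition above) =====
theorem has_repeated_chars_py_spec : Claim_equal_has_repeated_chars_py := by
  intro s thr _
  unfold Spec_has_repeated_chars_py
  rw [pvB_eq_good]
  unfold has_repeated_chars_py
  rw [pvA_eq_good]
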